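-- pv_equiv track=rewrite | github.com/kimsh8337/daliy-coding | 연습/20.09/문제/13.py | solution
-- ===== SOURCE A (Python) =====
-- def solution(A):
--     answer = 0
--     A.sort()
--     for i in range(len(A)):
--         if answer >= 1000000000:
--             answer = -1
--             break
--         if A[i] != i+1:
--             if A[i] > i+1:
--                 while(1):
--                     if A[i] == i+1:
--                         break
--                     A[i] -= 1
--                     answer += 1
--             elif A[i] < i+1:
--                 while(1):
--                     if A[i] == i+1:
--                         break
--                     A[i] += 1
--                     answer += 1
--
--     return answer
-- ===== SOURCE B (Python) =====
-- def solution(A):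
--     answer = 0
--     for i, v in enumerate(sorted(A), start=1):
--         if answer >= 1000000000:
--             return -1
--         answer += abs(v - i)
--     return answer
-- ===== Notes on version B (the rewrite author's own statement) =====
-- stated objective: faster
-- what changed: B adds abs(v-(i+1)) per element in one pass over sorted(A) instead of A's unit-by-unit while loops, keeping the same >=10**9 early-exit check; B does not mutate A (A sorts it in place).
import Mathlib
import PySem

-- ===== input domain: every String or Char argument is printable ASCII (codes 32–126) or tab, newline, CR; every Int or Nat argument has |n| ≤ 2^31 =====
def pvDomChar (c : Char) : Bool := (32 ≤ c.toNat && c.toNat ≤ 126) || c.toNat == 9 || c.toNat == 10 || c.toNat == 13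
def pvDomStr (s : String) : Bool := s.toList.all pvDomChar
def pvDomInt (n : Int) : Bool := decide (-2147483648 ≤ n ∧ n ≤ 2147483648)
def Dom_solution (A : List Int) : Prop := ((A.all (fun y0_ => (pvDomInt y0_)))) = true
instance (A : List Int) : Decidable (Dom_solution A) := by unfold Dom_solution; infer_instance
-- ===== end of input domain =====

-- B replaces A's unit-by-unit while loops by adding |v-(i+1)| per element (faster, one pass over sorted(A)).
-- A sorts its argument in place and mutates its elements; the equivalence proved here is about the RETURN value only.

-- ===== PORT A =====
-- A's inner `while(1): if A[i]==i+1: break; A[i] -= 1; answer += 1` (entered only with a > t;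
-- the `a ≤ t` guard is a totality guard only).
def whileDec (a t ans : Int) : Int :=
  if _h : a ≤ t then ans else whileDec (a - 1) t (ans + 1)
termination_by (a - t).toNat
decreasing_by omega

-- A's inner `while(1): if A[i]==i+1: break; A[i] += 1; answer += 1` (entered only with a < t).
def whileInc (a t ans : Int) : Int :=
  if _h : t ≤ a then ans else whileInc (a + 1) t (ans + 1)
termination_by (t - a).toNat
decreasing_by omega

-- A's main `for i in range(len(A))` loop over the sorted list, i carried as an Int counter.
def loopA : List Int → Int → Int → Int
  | [], _, ans => ans
  | v :: rest, i, ans =>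
    if ans ≥ 1000000000 then -1
    else
      let ans' :=
        if v ≠ i + 1 then
          if v > i + 1 then whileDec v (i + 1) ans
          else if v < i + 1 then whileInc v (i + 1) ans
          else ans
        else ans
      loopA rest (i + 1) ans'

def solution (A : List Int) : Int := loopA ((PySem.List.sorted A (fun x => x))) 0 0

-- ===== PORT B =====
def loopB : List Int → Int → Int → Int
  | [], _, ans => ans
  | v :: rest, i, ans =>
    if ans ≥ 1000000000 then -1
    else loopB rest (i + 1) (ans + |v - i|)

def solution_alt (A : List Int) : Int := loopB ((PySem.List.sorted A (fun x => x))) 1 0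

-- ===== PRECONDITION & SPEC =====
def Spec_solution (A : List Int) (out : Int) : Prop := out = solution_alt A
instance (A : List Int) (out : Int) : Decidable (Spec_solution A out) := by unfold Spec_solution; infer_instance

-- ===== CLAIM (what is proved, stated in full; the proofs are below) =====
def Claim_equal_solution : Prop := ∀ (A : List Int), Dom_solution A → Spec_solution A (solution A)

-- ===== LEMMAS AND PROOFS =====

theorem whileDec_eq (a t ans : Int) (h : t ≤ a) : whileDec a t ans = ans + (a - t) := by
  fun_induction whileDec a t ans with
  | case1 t ans hle => omega
  | case2 t ans hlt ih =>
    rw [ih (by omega)]; omega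

theorem whileInc_eq (a t ans : Int) (h : a ≤ t) : whileInc a t ans = ans + (t - a) := by
  fun_induction whileInc a t ans with
  | case1 t ans hle => omega
  | case2 t ans hlt ih =>
    rw [ih (by omega)]; omega

theorem loopA_eq_loopB (l : List Int) (i ans : Int) :
    loopA l i ans = loopB l (i + 1) ans := by
  induction l generalizing i ans with
  | nil => rfl
  | cons v rest ih =>
    simp only [loopA, loopB]
    by_cases hcap : ans ≥ 1000000000
    · simp [hcap]
    · simp only [hcap, if_false]
      have hstep : (if v ≠ i + 1 then
          if v > i + 1 then whileDec v (i + 1) ans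
          else if v < i + 1 then whileInc v (i + 1) ans
          else ans
        else ans) = ans + |v - (i + 1)| := by
        by_cases h1 : v = i + 1
        · simp [h1]
        · simp only [h1, ne_eq, not_false_iff, if_true]
          by_cases h2 : v > i + 1
          · rw [if_pos h2, whileDec_eq _ _ _ (by omega)]
            rw [abs_of_pos (by omega)]
          · rw [if_neg h2, if_pos (by omega), whileInc_eq _ _ _ (by omega)]
            rw [abs_of_neg (by omega)]; ring
      rw [hstep, ih]

-- ===== VERDICT (by name: the statement is the Claim_ definition above) =====
theorem solution_spec : Claim_equal_solution := by
  intro A _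
  unfold Spec_solution solution solution_alt
  simpa using loopA_eq_loopB ((PySem.List.sorted A (fun x => x))) 0 0
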